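-- pv_equiv track=rewrite | github.com/jasminemaygeddes/CGFproject | Project_functions.py | computerCards
-- ===== SOURCE A (Python) =====
-- def computerCards(list, param):
--     paramValueList = []
--     for i in range(len(list)):
--         paramValueList.append(list[i][param])
--     maxValue = max(paramValueList)
--
--     for i in range(len(list)):
--         if list[i][param] == maxValue:
--             return list[i]
-- ===== SOURCE B (Python) =====
-- def computerCards(list, param):
--     best = None
--     for card in list:
--         if best is None or card[param] > best[param]:
--             best = card
--     if best is None:
--         raise ValueError("max() arg is an empty sequence")
--     return best
-- ===== Notes on version B (the rewrite author's own statement) =====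
-- stated objective: simpler
-- what changed: Replaces the two-pass scheme (collect all param values into a list, take max, rescan for the first match) with a single pass that keeps the best card seen so far, updating only on a strictly greater value so the first maximal card wins.
import Mathlib
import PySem

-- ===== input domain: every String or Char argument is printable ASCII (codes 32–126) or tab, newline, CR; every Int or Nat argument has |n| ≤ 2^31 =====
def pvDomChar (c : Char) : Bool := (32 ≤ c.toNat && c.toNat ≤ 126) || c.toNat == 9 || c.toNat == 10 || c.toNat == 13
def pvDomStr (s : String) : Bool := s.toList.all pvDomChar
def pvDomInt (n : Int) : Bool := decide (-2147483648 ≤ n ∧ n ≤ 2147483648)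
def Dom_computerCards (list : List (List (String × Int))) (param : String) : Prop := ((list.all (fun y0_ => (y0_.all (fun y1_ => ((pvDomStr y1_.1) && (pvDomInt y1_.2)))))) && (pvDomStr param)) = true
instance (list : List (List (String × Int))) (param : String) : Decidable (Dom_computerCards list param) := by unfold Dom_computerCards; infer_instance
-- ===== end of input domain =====

-- B replaces A's two passes (collect all param values, max, rescan) with one pass
-- tracking the best card so far (strict > keeps the first maximal card); objective: simpler.
-- ===== PORT A =====
-- dict lookup d[k]: first match; total with default 0 (Pre_ guarantees the key is present)
def pvLookupD (d : List (String × Int)) (k : String) : Int :=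
  match d with
  | [] => 0
  | (k', v) :: t => if k' == k then v else pvLookupD t k

-- A's second loop: return the first element whose param-value equals maxValue
def pvAFind (list : List (List (String × Int))) (param : String) (m : Int) : List (String × Int) :=
  match list with
  | [] => []   -- Python falls through returning None; unreachable under Pre_
  | d :: t => if pvLookupD d param = m then d else pvAFind t param m

def computerCards (list : List (List (String × Int))) (param : String) : List (String × Int) :=
  let paramValueList := list.map (fun d => pvLookupD d param)
  match PySem.List.max? paramValueList (fun v => v) with
  | none => []   -- Python max([]) raises ValueError; excluded by Pre_
  | some maxValue => pvAFind list param maxValue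

-- ===== PORT B =====
-- single pass keeping the best card so far (strict > keeps the first maximal card)
def pvBLoop (param : String) (best : List (String × Int)) (rest : List (List (String × Int))) : List (String × Int) :=
  match rest with
  | [] => best
  | c :: t => pvBLoop param (if pvLookupD best param < pvLookupD c param then c else best) t

def computerCards_alt (list : List (List (String × Int))) (param : String) : List (String × Int) :=
  match list with
  | [] => []   -- Python raises ValueError; excluded by Pre_
  | x :: t => pvBLoop param x t

-- ===== PRECONDITION & SPEC =====
-- Pre_ excludes the empty list (max([]) raises ValueError in A) and cards missing
-- the key param (A raises KeyError).
def Pre_computerCards (list : List (List (String × Int))) (param : String) : Prop :=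
  list ≠ [] ∧ ∀ d ∈ list, param ∈ d.map Prod.fst
instance (list : List (List (String × Int))) (param : String) : Decidable (Pre_computerCards list param) := by unfold Pre_computerCards; infer_instance
def pvWitness_computerCards : (List (List (String × Int))) × String := ([[("a", 1)], [("a", 3)]], "a")
def Spec_computerCards (list : List (List (String × Int))) (param : String) (out : List (String × Int)) : Prop := out = computerCards_alt list param
instance (list : List (List (String × Int))) (param : String) (out : List (String × Int)) : Decidable (Spec_computerCards list param out) := by unfold Spec_computerCards; infer_instance

-- ===== CLAIM (what is proved, stated in full; the proofs are below) =====
def Claim_equal_computerCards : Prop := ∀ (list : List (List (String × Int))) (param : String), Dom_computerCards list param → Pre_computerCards list param → Spec_computerCards list param (computerCards list param)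

-- ===== LEMMAS AND PROOFS =====
theorem pvAFind_eq_bLoop (param : String) (t : List (List (String × Int))) :
    ∀ b, pvAFind (b :: t) param
        ((t.map (fun d => pvLookupD d param)).foldl max (pvLookupD b param))
      = pvBLoop param b t := by
  induction t with
  | nil => intro b; simp [pvAFind, pvBLoop]
  | cons y ys ih =>
    intro b
    simp only [List.map_cons, List.foldl_cons]
    have hk := (PySem.List.le_foldl_max
      ((ys.map (fun d => pvLookupD d param)))
      (max (pvLookupD b param) (pvLookupD y param))).1
    by_cases hgt : pvLookupD b param < pvLookupD y param
    · have h1 : max (pvLookupD b param) (pvLookupD y param) = pvLookupD y param :=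
        max_eq_right (le_of_lt hgt)
      rw [h1] at hk ⊢
      have hne : pvLookupD b param ≠
          (ys.map (fun d => pvLookupD d param)).foldl max (pvLookupD y param) := by omega
      show (if pvLookupD b param =
            (ys.map (fun d => pvLookupD d param)).foldl max (pvLookupD y param)
          then b else pvAFind (y :: ys) param _) = pvBLoop param b (y :: ys)
      rw [if_neg hne]
      show _ = pvBLoop param (if pvLookupD b param < pvLookupD y param then y else b) ys
      rw [if_pos hgt]
      exact ih y
    · have h1 : max (pvLookupD b param) (pvLookupD y param) = pvLookupD b param :=
        max_eq_left (by omega)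
      rw [h1] at hk ⊢
      show (if pvLookupD b param =
            (ys.map (fun d => pvLookupD d param)).foldl max (pvLookupD b param)
          then b else pvAFind (y :: ys) param _) = pvBLoop param b (y :: ys)
      have hrhs : pvBLoop param b (y :: ys) = pvBLoop param b ys := by
        show pvBLoop param (if pvLookupD b param < pvLookupD y param then y else b) ys = _
        rw [if_neg hgt]
      rw [hrhs]
      by_cases heq : pvLookupD b param =
          (ys.map (fun d => pvLookupD d param)).foldl max (pvLookupD b param)
      · rw [if_pos heq]
        have := ih b
        rw [← this, ← heq]
        show b = if pvLookupD b param = pvLookupD b param then b else _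
        rw [if_pos rfl]
      · rw [if_neg heq]
        have hyne : pvLookupD y param ≠
            (ys.map (fun d => pvLookupD d param)).foldl max (pvLookupD b param) := by omega
        show (if pvLookupD y param = _ then y else pvAFind ys param _) = _
        rw [if_neg hyne]
        have := ih b
        rw [← this]
        show _ = if pvLookupD b param = _ then b else pvAFind ys param _
        rw [if_neg heq]

-- ===== VERDICT (by name: the statement is the Claim_ definition above) =====
theorem computerCards_spec : Claim_equal_computerCards := by
  intro list param _ hpre
  unfold Spec_computerCards
  match list with
  | [] => exact absurd rfl hpre.1
  | b :: t =>
    show computerCards (b :: t) param = computerCards_alt (b :: t) param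
    unfold computerCards computerCards_alt
    simp only [List.map_cons, PySem.List.max?_id_cons]
    exact pvAFind_eq_bLoop param t b
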